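-- pv_equiv track=rewrite | github.com/AaronHowell/S-DES_with_PyDracula_GUI | gui.py | divide_task
-- ===== SOURCE A (Python) =====
-- def divide_task(num_segments):
--     start = 0
--     end = 1023
--     if num_segments <= 0:
--         return []
--     segment_size = (end - start) // num_segments
--     segments = []
--     current_start = start
--     for _ in range(num_segments):
--         current_end = current_start + segment_size
--         # 确保最后一个段不超出范围的终点
--         if _ == num_segments - 1:
--             current_end = end
--         # 将起点和终点转换为8位二进制字符串
--         start_binary = format(current_start, '010b')
--         end_binary = format(current_end, '010b')
--         segments.append((start_binary, end_binary))
--         current_start = current_end + 1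
--     return segments
-- ===== SOURCE B (Python) =====
-- def divide_task(num_segments):
--     if num_segments <= 0:
--         return []
--     step = 1023 // num_segments + 1
--     bounds = list(range(0, num_segments * step, step)) + [1024]
--     return [(format(a, '010b'), format(b - 1, '010b'))
--             for a, b in zip(bounds, bounds[1:])]
-- ===== Notes on version B (the rewrite author's own statement) =====
-- stated objective: alternative
-- what changed: B first builds the list of segment boundaries (a stepped range plus the sentinel 1024), then pairs adjacent boundaries with zip and formats (start, next-1); this removes both A's running current_start accumulator and A's special-case branch for the last segment.
import Mathlib
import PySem

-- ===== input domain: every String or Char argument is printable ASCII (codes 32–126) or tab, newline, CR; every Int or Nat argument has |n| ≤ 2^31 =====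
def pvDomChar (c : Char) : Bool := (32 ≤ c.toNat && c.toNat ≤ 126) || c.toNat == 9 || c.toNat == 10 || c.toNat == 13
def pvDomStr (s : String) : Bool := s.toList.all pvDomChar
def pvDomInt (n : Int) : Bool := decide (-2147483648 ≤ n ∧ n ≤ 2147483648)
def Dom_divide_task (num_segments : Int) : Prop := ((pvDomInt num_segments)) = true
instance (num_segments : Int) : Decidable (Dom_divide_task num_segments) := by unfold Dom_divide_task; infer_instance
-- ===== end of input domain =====

-- B builds the boundary list (stepped range plus sentinel 1024) and pairs adjacent
-- boundaries with zip, removing A's running accumulator and last-segment branch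
-- (objective: alternative; same cost).

-- shared helper: format(n, '010b') for n ≥ 0 — binary digits zero-padded to width 10
-- (exact for nonnegative n, the only values both programs format)
def fmt010 (n : Int) : String :=
  let ds := Nat.toDigits 2 n.toNat
  String.mk (List.replicate (10 - ds.length) '0' ++ ds)

-- ===== PORT A =====
def divide_task (num_segments : Int) : List (String × String) :=
  if num_segments ≤ 0 then []
  else
    let segment_size := PySem.Int.floordiv (1023 - 0) num_segments
    let st := (PySem.List.pyRange 0 num_segments 1).foldl
      (fun (st : Int × List (String × String)) (i : Int) =>
        let current_start := st.1
        let current_end := current_start + segment_size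
        let current_end := if i = num_segments - 1 then 1023 else current_end
        (current_end + 1, st.2 ++ [(fmt010 current_start, fmt010 current_end)]))
      ((0 : Int), ([] : List (String × String)))
    st.2

-- ===== PORT B =====
def divide_task_alt (num_segments : Int) : List (String × String) :=
  if num_segments ≤ 0 then []
  else
    let step := PySem.Int.floordiv 1023 num_segments + 1
    let bounds := PySem.List.pyRange 0 (num_segments * step) step ++ [1024]
    (bounds.zip bounds.tail).map (fun p => (fmt010 p.1, fmt010 (p.2 - 1)))

-- ===== PRECONDITION & SPEC =====
def Spec_divide_task (num_segments : Int) (out : List (String × String)) : Prop := out = divide_task_alt num_segments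
instance (num_segments : Int) (out : List (String × String)) : Decidable (Spec_divide_task num_segments out) := by unfold Spec_divide_task; infer_instance

-- ===== CLAIM (what is proved, stated in full; the proofs are below) =====
def Claim_equal_divide_task : Prop := ∀ (num_segments : Int), Dom_divide_task num_segments → Spec_divide_task num_segments (divide_task num_segments)

-- ===== LEMMAS AND PROOFS =====

-- A's loop invariant: folding A's body over range k (k < n, so the last-segment override
-- never fires) leaves current_start = k*(s+1) and the segments built so far in closed form
theorem divide_task_loop (n : Int) (s : Int) (k : Nat) (hk : (k : Int) < n) :
    (PySem.List.pyRange 0 (k : Int) 1).foldl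
      (fun (st : Int × List (String × String)) (i : Int) =>
        ((if i = n - 1 then 1023 else st.1 + s) + 1,
         st.2 ++ [(fmt010 st.1, fmt010 (if i = n - 1 then 1023 else st.1 + s))]))
      ((0 : Int), ([] : List (String × String)))
    = ((k : Int) * (s + 1),
       (PySem.List.pyRange 0 (k : Int) 1).map (fun i =>
         (fmt010 (i * (s + 1)),
          fmt010 (if i = n - 1 then 1023 else i * (s + 1) + s)))) := by
  induction k with
  | zero => simp
  | succ m ih =>
    have hm : (m : Int) < n := by push_cast at hk ⊢; omega
    have hne : (m : Int) ≠ n - 1 := by omega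
    have hc : ((m + 1 : Nat) : Int) = (m : Int) + 1 := by push_cast; ring
    rw [hc, PySem.List.pyRange_one_succ_right (by positivity)]
    rw [List.foldl_append, List.map_append, ih hm]
    simp only [List.foldl_cons, List.foldl_nil, List.map_cons, List.map_nil]
    rw [if_neg hne]
    simp only [Prod.mk.injEq]
    exact ⟨by ring, trivial⟩

-- A in closed-map form
theorem divide_task_A_closed (n : Int) (hn : ¬ n ≤ 0) :
    divide_task n
    = (PySem.List.pyRange 0 n 1).map (fun i =>
        (fmt010 (i * (PySem.Int.floordiv 1023 n + 1)),
         fmt010 (if i = n - 1 then 1023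
                 else i * (PySem.Int.floordiv 1023 n + 1) + PySem.Int.floordiv 1023 n))) := by
  unfold divide_task
  simp only [if_neg hn]
  set s := PySem.Int.floordiv (1023 - 0) n with hs
  have hs' : PySem.Int.floordiv 1023 n = s := by norm_num [hs]
  rw [hs']
  obtain ⟨m, hm⟩ : ∃ m : Nat, n = (m : Int) + 1 := by
    refine ⟨(n - 1).toNat, ?_⟩; omega
  rw [hm, PySem.List.pyRange_one_succ_right (by positivity), List.foldl_append, List.map_append]
  have hmn : (m : Int) < n := by omega
  rw [← hm, divide_task_loop n s m hmn]
  have heq : (m : Int) = n - 1 := by omega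
  simp only [List.foldl_cons, List.foldl_nil, List.map_cons, List.map_nil, if_pos heq]

-- adjacent pairs of the boundary list map g [k, …, k+N-1] ++ [z], via zip-with-tail
theorem zip_tail_bounds (g : Nat → Int) (z : Int) (N k : Nat) :
    ((List.map g (List.range' k N) ++ [z]).zip ((List.map g (List.range' k N) ++ [z]).tail))
    = (List.range' k N).map (fun i => (g i, if i = k + N - 1 then z else g (i + 1))) := by
  apply List.ext_getElem
  · simp
  · intro i h1 h2
    have hiN : i < N := by simpa using h2
    rw [List.getElem_zip, List.getElem_tail, List.getElem_map, List.getElem_range']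
    by_cases hlt : i + 1 < N
    · rw [List.getElem_append_left (by simpa using hiN),
        List.getElem_append_left (by simpa using hlt),
        List.getElem_map, List.getElem_map, List.getElem_range', List.getElem_range',
        if_neg (by omega)]
      simp only [Prod.mk.injEq]
      exact ⟨trivial, congrArg g (by omega)⟩
    · rw [List.getElem_append_left (by simpa using hiN),
        List.getElem_append_right (by simpa using hlt),
        List.getElem_map, List.getElem_range', if_pos (by omega)]
      simp

-- B in the same closed-map form
theorem divide_task_B_closed (n : Int) (hn : ¬ n ≤ 0) :
    divide_task_alt n
    = (PySem.List.pyRange 0 n 1).map (fun i =>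
        (fmt010 (i * (PySem.Int.floordiv 1023 n + 1)),
         fmt010 (if i = n - 1 then 1023
                 else i * (PySem.Int.floordiv 1023 n + 1) + PySem.Int.floordiv 1023 n))) := by
  unfold divide_task_alt
  simp only [if_neg hn]
  set s := PySem.Int.floordiv 1023 n with hs
  have hspos : 0 ≤ s := by
    rw [hs]; exact PySem.Int.floordiv_nonneg (by norm_num) (by omega)
  set step := s + 1 with hstep
  have hsteppos : (0:Int) < step := by omega
  obtain ⟨N, hN⟩ : ∃ N : Nat, n = (N : Int) := ⟨n.toNat, by omega⟩
  have hN1 : 1 ≤ N := by omega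
  -- the stepped range is map (step * ·) over range N
  have hcount : (if (0:Int) < n * step then ((n * step - 0 + step - 1) / step).toNat else 0) = N := by
    have hpos : (0:Int) < n * step := mul_pos (by omega) hsteppos
    rw [if_pos hpos]
    have : (n * step - 0 + step - 1) / step = n + (step - 1) / step := by
      rw [sub_zero, show n * step + step - 1 = (step - 1) + step * n by ring,
        Int.add_mul_ediv_left _ _ (by omega : step ≠ 0)]
      ring
    rw [this, Int.ediv_eq_zero_of_lt (by omega) (by omega)]
    omega
  rw [PySem.List.pyRange_of_pos 0 (n * step) hsteppos, hcount]
  have hmapeq : List.map (fun k : Nat => (0:Int) + step * ↑k) (List.range N)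
      = List.map (fun k : Nat => step * (k : Int)) (List.range' 0 N) := by
    rw [List.range_eq_range']
    exact List.map_congr_left (fun a _ => by ring)
  rw [hmapeq, zip_tail_bounds (fun k : Nat => step * (k : Int)) 1024 N 0]
  rw [PySem.List.pyRange_one 0 n, hN]
  simp only [sub_zero, Int.toNat_natCast, List.range_eq_range', List.map_map]
  apply List.map_congr_left
  intro a ha
  have haN : a < N := by
    have := List.mem_range'_1.mp ha; omega
  simp only [Function.comp]
  by_cases hlast : a = 0 + N - 1
  · have hi : ((0:Int) + (a:Int)) = (N:Int) - 1 := by omega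
    rw [if_pos hlast, if_pos hi]
    simp only [Prod.mk.injEq]
    exact ⟨congrArg fmt010 (by ring), congrArg fmt010 (by norm_num)⟩
  · have hi : ¬ ((0:Int) + (a:Int)) = (N:Int) - 1 := by omega
    rw [if_neg hlast, if_neg hi]
    simp only [Prod.mk.injEq]
    exact ⟨congrArg fmt010 (by ring), congrArg fmt010 (by rw [hstep]; push_cast; ring)⟩

-- ===== VERDICT (by name: the statement is the Claim_ definition above) =====
theorem divide_task_spec : Claim_equal_divide_task := by
  intro n _
  show divide_task n = divide_task_alt n
  by_cases h : n ≤ 0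
  · unfold divide_task divide_task_alt; simp [h]
  · rw [divide_task_A_closed n h, divide_task_B_closed n h]
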